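-- pv_equiv track=rewrite | github.com/EdoardoSantagata/pacificshipping | function_1-route_mapping_and_connectivity/servicemapping.py | analyse_connectivity_metrics
-- ===== SOURCE A (Python) =====
-- from collections import defaultdict
--
-- def analyse_connectivity_metrics(routes, country_ports, route_operators):
--     """
--     analyse connectivity metrics for PICTs based on routes and operators.
--
--     Args:
--     - routes (dict): Dictionary of route names and their port lists.
--     - country_ports (dict): Dictionary mapping countries to their ports.
--     - route_operators (dict): Dictionary mapping route names to service providers/operators.
--
--     Returns:
--     - connectivity_metrics (dict): Calculated connectivity metrics for each country.
--     """
--     #initialise metrics dictionary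
--     connectivity_metrics = defaultdict(lambda: {
--         "port_frequency": 0,          #how often ports in the country appear in routes
--         "connections": set(),         #unique countries connected to this country
--         "routes_count": set(),        #unique routes passing through this country
--         "service_providers": set(),   #unique operators serving this country
--     })
--
--     #iterate through all routes
--     for route_name, route_ports in routes.items():
--         operator = route_operators.get(route_name, "Unknown")  #get operator for the route
--         visited_countries = set()
--
--         for i, port in enumerate(route_ports):
--             #identify the country for the current port
--             for country, ports in country_ports.items():
--                 if port in ports:
--                     #update Port Frequency
--                     connectivity_metrics[country]["port_frequency"] += 1
--
--                     #update Routes Count (add route to set to avoid duplicates)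
--                     connectivity_metrics[country]["routes_count"].add(route_name)
--
--                     #update Service Providers (add operator to set)
--                     connectivity_metrics[country]["service_providers"].add(operator)
--
--                     #track connected countries
--                     if i > 0:  #previous port
--                         prev_port = route_ports[i - 1]
--                         for conn_country, conn_ports in country_ports.items():
--                             if prev_port in conn_ports and conn_country != country:
--                                 connectivity_metrics[country]["connections"].add(conn_country)
--                     if i < len(route_ports) - 1:  #next port
--                         next_port = route_ports[i + 1]
--                         for conn_country, conn_ports in country_ports.items():
--                             if next_port in conn_ports and conn_country != country:
--                                 connectivity_metrics[country]["connections"].add(conn_country)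
--
--                     visited_countries.add(country)
--                     break
--
--     #finalise metrics by converting sets to counts
--     for country, metrics in connectivity_metrics.items():
--         metrics["connections"] = len(metrics["connections"])  #count of unique connections
--         metrics["routes_count"] = len(metrics["routes_count"])  #count of unique routes
--         metrics["service_providers"] = len(metrics["service_providers"])  #count of unique operators
--
--     return connectivity_metrics
-- ===== SOURCE B (Python) =====
-- from collections import defaultdict
--
-- def analyse_connectivity_metrics(routes, country_ports, route_operators):
--     """Same metrics as A, computed via precomputed port->country indexes and a
--     separate pairwise pass over adjacent ports (no repeated scans of country_ports)."""
--     connectivity_metrics = defaultdict(lambda: {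
--         "port_frequency": 0,
--         "connections": set(),
--         "routes_count": set(),
--         "service_providers": set(),
--     })
--
--     # build the two indexes once: first country containing a port, and the
--     # ordered list of all countries containing it
--     first_country = {}
--     all_countries = {}
--     for country, ports in country_ports.items():
--         for port in set(ports):
--             first_country.setdefault(port, country)
--             all_countries.setdefault(port, []).append(country)
--
--     for route_name, route_ports in routes.items():
--         operator = route_operators.get(route_name, "Unknown")
--
--         # pass 1: per-port metrics
--         for port in route_ports:
--             country = first_country.get(port)
--             if country is not None:
--                 entry = connectivity_metrics[country]
--                 entry["port_frequency"] += 1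
--                 entry["routes_count"].add(route_name)
--                 entry["service_providers"].add(operator)
--
--         # pass 2: connections, one look at each adjacent pair
--         for p, q in zip(route_ports, route_ports[1:]):
--             cp = first_country.get(p)
--             cq = first_country.get(q)
--             if cp is not None:
--                 for c2 in all_countries.get(q, []):
--                     if c2 != cp:
--                         connectivity_metrics[cp]["connections"].add(c2)
--             if cq is not None:
--                 for c2 in all_countries.get(p, []):
--                     if c2 != cq:
--                         connectivity_metrics[cq]["connections"].add(c2)
--
--     for country, metrics in connectivity_metrics.items():
--         metrics["connections"] = len(metrics["connections"])
--         metrics["routes_count"] = len(metrics["routes_count"])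
--         metrics["service_providers"] = len(metrics["service_providers"])
--
--     return connectivity_metrics
-- ===== Notes on version B (the rewrite author's own statement) =====
-- stated objective: faster
-- what changed: B precomputes two port->country indexes (first containing country, list of all containing countries) once, replacing A's per-port linear scans of country_ports, and computes the connections metric in a separate pass over adjacent port pairs instead of A's interleaved prev/next rescans.
import Mathlib
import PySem

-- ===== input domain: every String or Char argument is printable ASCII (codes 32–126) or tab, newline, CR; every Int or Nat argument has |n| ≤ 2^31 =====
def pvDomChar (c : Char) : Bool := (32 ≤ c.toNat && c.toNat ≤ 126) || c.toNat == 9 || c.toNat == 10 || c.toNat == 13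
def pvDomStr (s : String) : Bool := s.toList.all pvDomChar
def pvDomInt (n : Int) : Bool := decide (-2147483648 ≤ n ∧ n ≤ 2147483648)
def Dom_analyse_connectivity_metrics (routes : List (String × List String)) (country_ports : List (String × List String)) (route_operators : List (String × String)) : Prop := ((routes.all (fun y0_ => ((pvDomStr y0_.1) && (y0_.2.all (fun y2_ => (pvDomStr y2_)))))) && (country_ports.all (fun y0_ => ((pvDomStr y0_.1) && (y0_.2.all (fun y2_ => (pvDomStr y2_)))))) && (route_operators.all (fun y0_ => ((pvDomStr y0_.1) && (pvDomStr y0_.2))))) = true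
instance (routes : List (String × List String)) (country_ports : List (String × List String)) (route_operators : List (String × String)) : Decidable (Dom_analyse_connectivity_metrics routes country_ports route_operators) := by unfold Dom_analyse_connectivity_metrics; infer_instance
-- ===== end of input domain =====

-- B replaces A's per-port scans of country_ports by two indexes built once (first
-- containing country / all containing countries per port) and computes the
-- "connections" metric in a separate pass over adjacent port pairs (objective: faster).

-- ----- shared metric-dictionary model: the defaultdict of per-country entries -----
-- an entry is (port_frequency, connections, routes_count, service_providers)
abbrev PVE := Int × PySem.Set String × PySem.Set String × PySem.Set String
abbrev PVM := List (String × PVE)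

def pvE0 : PVE := (0, PySem.Set.empty, PySem.Set.empty, PySem.Set.empty)

-- connectivity_metrics[k] mutated by f (defaultdict: a missing key is appended with the default entry)
def pvDmod : PVM → String → (PVE → PVE) → PVM
  | [], k, f => [(k, f pvE0)]
  | (a, e) :: t, k, f => if a = k then (a, f e) :: t else (a, e) :: pvDmod t k f

def pvUpdFreq (v : PVE) : PVE := (v.1 + 1, v.2)
def pvUpdConn (c : String) (v : PVE) : PVE := (v.1, PySem.Set.add v.2.1 c, v.2.2)
def pvUpdRoute (r : String) (v : PVE) : PVE := (v.1, v.2.1, PySem.Set.add v.2.2.1 r, v.2.2.2)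
def pvUpdProv (o : String) (v : PVE) : PVE := (v.1, v.2.1, v.2.2.1, PySem.Set.add v.2.2.2 o)

-- the final loop turning the three sets into counts (identical in A and B)
def pvFinalize (m : PVM) : List (String × List (String × Int)) :=
  m.map (fun ce => (ce.1,
    [("port_frequency", ce.2.1),
     ("connections", (PySem.Set.len ce.2.2.1 : Int)),
     ("routes_count", (PySem.Set.len ce.2.2.2.1 : Int)),
     ("service_providers", (PySem.Set.len ce.2.2.2.2 : Int))]))

-- ===== PORT A =====
-- inner 'for conn_country, conn_ports in country_ports.items()' loop adding connected countries
def pvConnScanA (cps : List (String × List String)) (nb country : String) (m : PVM) : PVM :=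
  cps.foldl (fun m ce => if nb ∈ ce.2 ∧ ce.1 ≠ country then pvDmod m country (pvUpdConn ce.1) else m) m

-- the 'for country, ports in country_ports.items(): if port in ports: … break' scan
def pvPortStepA (cps rest : List (String × List String)) (rn op : String) (ports : List String)
    (i : Int) (port : String) (st : PVM × PySem.Set String) : PVM × PySem.Set String :=
  match rest with
  | [] => st
  | (country, cports) :: t =>
    if port ∈ cports then
      let m := pvDmod st.1 country pvUpdFreq
      let m := pvDmod m country (pvUpdRoute rn)
      let m := pvDmod m country (pvUpdProv op)
      -- route_ports[i-1] / route_ports[i+1]: in range under the guards, so pyGet? is some and the "" default is never used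
      let m := if 0 < i then pvConnScanA cps ((PySem.List.pyGet? ports (i - 1)).getD "") country m else m
      let m := if i < (ports.length : Int) - 1 then pvConnScanA cps ((PySem.List.pyGet? ports (i + 1)).getD "") country m else m
      (m, PySem.Set.add st.2 country)
    else pvPortStepA cps t rn op ports i port st

def pvRouteA (cps : List (String × List String)) (ro : List (String × String))
    (m : PVM) (route : String × List String) : PVM :=
  let op := (PySem.Dict.mk ro).getD route.1 "Unknown"
  -- (the per-route 'visited_countries' set is carried but, as in A, never read)
  ((PySem.List.enumerate route.2).foldl
    (fun st ip => pvPortStepA cps cps route.1 op route.2 ip.1 ip.2 st)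
    (m, PySem.Set.empty)).1

def analyse_connectivity_metrics (routes : List (String × List String)) (country_ports : List (String × List String)) (route_operators : List (String × String)) : List (String × List (String × Int)) :=
  pvFinalize (routes.foldl (pvRouteA country_ports route_operators) [])

-- ===== PORT B =====
-- the two indexes: first_country (setdefault) and all_countries (append), built in one sweep.
-- Source B iterates 'set(ports)' (PySem.Set.ofList): both dicts are only looked up afterwards,
-- so the result does not depend on Python's set iteration order.
def pvBuildIdx (cps : List (String × List String)) :
    PySem.Dict String String × PySem.Dict String (List String) :=
  cps.foldl (fun fa ce =>
      (PySem.Set.ofList ce.2).foldl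
        (fun fa p => (fa.1.setdefault p ce.1, fa.2.modify p [] (· ++ [ce.1]))) fa)
    (PySem.Dict.empty, PySem.Dict.empty)

-- pass 1: port_frequency / routes_count / service_providers for one route
def pvPass1B (fc : PySem.Dict String String) (rn op : String) (m : PVM) (ports : List String) : PVM :=
  ports.foldl (fun m p =>
    match fc.get? p with
    | none => m
    | some c => pvDmod (pvDmod (pvDmod m c pvUpdFreq) c (pvUpdRoute rn)) c (pvUpdProv op)) m

-- 'for c2 in all_countries.get(src, []): if c2 != tgt: metrics[tgt]["connections"].add(c2)'
def pvAddConnsB (ac : PySem.Dict String (List String)) (src tgt : String) (m : PVM) : PVM :=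
  (ac.getD src []).foldl (fun m c2 => if c2 ≠ tgt then pvDmod m tgt (pvUpdConn c2) else m) m

-- pass 2: connections, over zip(route_ports, route_ports[1:])
def pvPass2B (fc : PySem.Dict String String) (ac : PySem.Dict String (List String))
    (m : PVM) (ports : List String) : PVM :=
  (ports.zip (PySem.List.slice ports (some 1) none)).foldl (fun m pq =>
    let m := match fc.get? pq.1 with
      | none => m
      | some c => pvAddConnsB ac pq.2 c m
    match fc.get? pq.2 with
      | none => m
      | some c => pvAddConnsB ac pq.1 c m) m

def pvRouteB (fc : PySem.Dict String String) (ac : PySem.Dict String (List String))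
    (ro : List (String × String)) (m : PVM) (route : String × List String) : PVM :=
  let op := (PySem.Dict.mk ro).getD route.1 "Unknown"
  pvPass2B fc ac (pvPass1B fc route.1 op m route.2) route.2

def analyse_connectivity_metrics_alt (routes : List (String × List String)) (country_ports : List (String × List String)) (route_operators : List (String × String)) : List (String × List (String × Int)) :=
  let idx := pvBuildIdx country_ports
  pvFinalize (routes.foldl (pvRouteB idx.1 idx.2 route_operators) [])

-- ===== PRECONDITION & SPEC =====
def Spec_analyse_connectivity_metrics (routes : List (String × List String)) (country_ports : List (String × List String)) (route_operators : List (String × String)) (out : List (String × List (String × Int))) : Prop := out = analyse_connectivity_metrics_alt routes country_ports route_operators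
instance (routes : List (String × List String)) (country_ports : List (String × List String)) (route_operators : List (String × String)) (out : List (String × List (String × Int))) : Decidable (Spec_analyse_connectivity_metrics routes country_ports route_operators out) := by unfold Spec_analyse_connectivity_metrics; infer_instance

-- ===== CLAIM (what is proved, stated in full; the proofs are below) =====
def Claim_equal_analyse_connectivity_metrics : Prop := ∀ (routes : List (String × List String)) (country_ports : List (String × List String)) (route_operators : List (String × String)), Dom_analyse_connectivity_metrics routes country_ports route_operators → Spec_analyse_connectivity_metrics routes country_ports route_operators (analyse_connectivity_metrics routes country_ports route_operators)

-- ===== LEMMAS AND PROOFS =====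

def pvFirstC (cps : List (String × List String)) (p : String) : Option String :=
  ((cps.filter (fun ce => p ∈ ce.2)).head?).map (·.1)
def pvAllC (cps : List (String × List String)) (p : String) : List String :=
  (cps.filter (fun ce => p ∈ ce.2)).map (·.1)
def pvKeys (m : PVM) : List String := m.map Prod.fst

theorem pvDmod_pvDmod_same (m : PVM) (k : String) (f g : PVE → PVE) :
    pvDmod (pvDmod m k f) k g = pvDmod m k (fun e => g (f e)) := by
  induction m with
  | nil => simp [pvDmod]
  | cons h t ih =>
    obtain ⟨a, e⟩ := h
    by_cases hak : a = k
    · simp [pvDmod, hak]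
    · simp [pvDmod, hak, ih]

theorem mem_pvKeys_pvDmod_self (m : PVM) (k : String) (f : PVE → PVE) :
    k ∈ pvKeys (pvDmod m k f) := by
  induction m with
  | nil => simp [pvDmod, pvKeys]
  | cons h t ih =>
    obtain ⟨a, e⟩ := h
    by_cases hak : a = k
    · simp [pvDmod, hak, pvKeys]
    · simp [pvDmod, hak, pvKeys] at ih ⊢
      exact Or.inr ih

theorem mem_pvKeys_pvDmod (m : PVM) (k k' : String) (f : PVE → PVE) (h : k' ∈ pvKeys m) :
    k' ∈ pvKeys (pvDmod m k f) := by
  induction m with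
  | nil => simp [pvKeys] at h
  | cons hd t ih =>
    obtain ⟨a, e⟩ := hd
    by_cases hak : a = k
    · simpa [pvDmod, hak, pvKeys] using (by simpa [pvKeys, hak] using h)
    · simp [pvKeys] at h
      rcases h with h | h
      · simp [pvDmod, hak, pvKeys, h]
      · simp [pvDmod, hak, pvKeys]
        exact Or.inr (by simpa [pvKeys] using ih (by simpa [pvKeys] using h))

theorem pvDmod_comm_ne (m : PVM) (k k' : String) (f g : PVE → PVE)
    (hne : k ≠ k') (hk : k ∈ pvKeys m ∨ k' ∈ pvKeys m) :
    pvDmod (pvDmod m k' g) k f = pvDmod (pvDmod m k f) k' g := by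
  induction m with
  | nil => simp [pvKeys] at hk
  | cons hd t ih =>
    obtain ⟨a, e⟩ := hd
    by_cases hak : a = k
    · subst hak
      have hne' : ¬ (a = k') := hne
      simp [pvDmod, hne']
    · by_cases hak' : a = k'
      · subst hak'
        have h2 : ¬ (k = a) := fun h => hak h.symm
        simp [pvDmod, hak, h2]
      · have hk' : k ∈ pvKeys t ∨ k' ∈ pvKeys t := by
          simp [pvKeys] at hk ⊢
          rcases hk with (h | h) | (h | h)
          · exact absurd h.symm hak
          · exact Or.inl h
          · exact absurd h.symm hak'
          · exact Or.inr h
        simp [pvDmod, hak, hak', ih hk']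

theorem pvInner_split (s : List String) (c : String)
    (fa : PySem.Dict String String × PySem.Dict String (List String)) :
    s.foldl (fun fa p => (fa.1.setdefault p c, fa.2.modify p [] (· ++ [c]))) fa
      = (s.foldl (fun d p => d.setdefault p c) fa.1,
         s.foldl (fun d p => d.modify p [] (· ++ [c])) fa.2) := by
  induction s generalizing fa with
  | nil => simp
  | cons q t ih => simp [List.foldl_cons, ih]

theorem pvGet?_setdefault (d : PySem.Dict String String) (p q c : String) :
    (d.setdefault q c).get? p = if p = q then some ((d.get? q).getD c) else d.get? p := by
  by_cases hc : d.contains q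
  · rw [PySem.Dict.setdefault_of_contains _ _ hc]
    split
    · next h =>
      subst h
      have hs : (d.get? p).isSome := by rw [← PySem.Dict.contains_eq_isSome_get?]; exact hc
      rcases Option.isSome_iff_exists.mp hs with ⟨v, hv⟩
      simp [hv]
    · rfl
  · rw [PySem.Dict.setdefault_of_not_contains _ _ (by simpa using hc)]
    rw [PySem.Dict.get?_insert]
    have : d.get? q = none := by
      rw [PySem.Dict.get?_eq_none_iff_contains]
      simpa using hc
    split
    · next h => subst h; simp [this]
    · rfl

theorem pvInner_fc (s : List String) (c : String) (d : PySem.Dict String String) (p : String) :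
    (s.foldl (fun d p => d.setdefault p c) d).get? p
      = if p ∈ s then some ((d.get? p).getD c) else d.get? p := by
  induction s generalizing d with
  | nil => simp
  | cons q t ih =>
    simp only [List.foldl_cons, ih, pvGet?_setdefault]
    by_cases hpq : p = q
    · subst hpq
      by_cases hpt : p ∈ t <;> simp [hpt] <;> cases d.get? p <;> simp
    · by_cases hpt : p ∈ t <;> simp [hpt, hpq]

theorem pvInner_ac (s : List String) (hs : s.Nodup) (c : String)
    (d : PySem.Dict String (List String)) (p : String) :
    (s.foldl (fun d p => d.modify p [] (· ++ [c])) d).getD p []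
      = if p ∈ s then d.getD p [] ++ [c] else d.getD p [] := by
  induction s generalizing d with
  | nil => simp
  | cons q t ih =>
    simp only [List.foldl_cons]
    rw [ih hs.of_cons]
    by_cases hpq : p = q
    · subst hpq
      have hpt : p ∉ t := (List.nodup_cons.mp hs).1
      simp [hpt, PySem.Dict.getD_modify]
    · by_cases hpt : p ∈ t <;> simp [hpt, hpq, PySem.Dict.getD_modify]

theorem pvBuild_fc_aux (cps : List (String × List String))
    (fa : PySem.Dict String String × PySem.Dict String (List String)) (p : String) :
    ((cps.foldl (fun fa ce =>
        (PySem.Set.ofList ce.2).foldl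
          (fun fa p => (fa.1.setdefault p ce.1, fa.2.modify p [] (· ++ [ce.1]))) fa) fa).1).get? p
      = (fa.1.get? p).or (pvFirstC cps p) := by
  induction cps generalizing fa with
  | nil => simp [pvFirstC]
  | cons ce t ih =>
    simp only [List.foldl_cons]
    rw [ih]
    rw [pvInner_split]
    simp only [pvInner_fc]
    by_cases hp : p ∈ ce.2
    · have : p ∈ PySem.Set.ofList ce.2 := by simpa [PySem.Set.mem_ofList] using hp
      simp only [this, if_pos]
      have hfil : pvFirstC (ce :: t) p = some ce.1 := by simp [pvFirstC, List.filter_cons, hp]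
      rw [hfil]
      cases fa.1.get? p <;> simp
    · have : p ∉ PySem.Set.ofList ce.2 := by simpa [PySem.Set.mem_ofList] using hp
      rw [if_neg this]
      have hfil : pvFirstC (ce :: t) p = pvFirstC t p := by simp [pvFirstC, List.filter_cons, hp]
      simp [hfil]

theorem pvBuild_ac_aux (cps : List (String × List String))
    (fa : PySem.Dict String String × PySem.Dict String (List String)) (p : String) :
    ((cps.foldl (fun fa ce =>
        (PySem.Set.ofList ce.2).foldl
          (fun fa p => (fa.1.setdefault p ce.1, fa.2.modify p [] (· ++ [ce.1]))) fa) fa).2).getD p []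
      = fa.2.getD p [] ++ pvAllC cps p := by
  induction cps generalizing fa with
  | nil => simp [pvAllC]
  | cons ce t ih =>
    simp only [List.foldl_cons]
    rw [ih, pvInner_split]
    simp only
    rw [pvInner_ac _ (PySem.Set.nodup_ofList _)]
    by_cases hp : p ∈ ce.2
    · have hmem : p ∈ PySem.Set.ofList ce.2 := by simpa [PySem.Set.mem_ofList] using hp
      simp only [hmem, if_pos]
      simp [pvAllC, List.filter_cons, hp]
    · have hmem : p ∉ PySem.Set.ofList ce.2 := by simpa [PySem.Set.mem_ofList] using hp
      rw [if_neg hmem]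
      simp [pvAllC, List.filter_cons, hp]

theorem pvBuildIdx_fst_get? (cps : List (String × List String)) (p : String) :
    ((pvBuildIdx cps).1).get? p = pvFirstC cps p := by
  unfold pvBuildIdx
  rw [pvBuild_fc_aux]
  simp

theorem pvBuildIdx_snd_getD (cps : List (String × List String)) (p : String) :
    ((pvBuildIdx cps).2).getD p [] = pvAllC cps p := by
  unfold pvBuildIdx
  rw [pvBuild_ac_aux]
  simp


-- ----- A-side normal forms -----
def pvD3 (rn op c : String) (m : PVM) : PVM :=
  pvDmod (pvDmod (pvDmod m c pvUpdFreq) c (pvUpdRoute rn)) c (pvUpdProv op)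

def pvConnFold (tgt : String) (l : List String) (m : PVM) : PVM :=
  l.foldl (fun m c2 => if c2 ≠ tgt then pvDmod m tgt (pvUpdConn c2) else m) m

def pvAStepC (cps : List (String × List String)) (rn op : String) (ports : List String)
    (i : Int) (c : String) (m : PVM) : PVM :=
  let m := pvD3 rn op c m
  let m := if 0 < i then pvConnScanA cps ((PySem.List.pyGet? ports (i - 1)).getD "") c m else m
  if i < (ports.length : Int) - 1 then pvConnScanA cps ((PySem.List.pyGet? ports (i + 1)).getD "") c m else m

def pvAStep (cps : List (String × List String)) (rn op : String) (ports : List String)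
    (i : Int) (port : String) (m : PVM) : PVM :=
  match pvFirstC cps port with
  | none => m
  | some c => pvAStepC cps rn op ports i c m

def pvWindow (cps : List (String × List String)) (rn op : String) :
    Option String → List String → PVM → PVM
  | _, [], m => m
  | pv?, q :: rest, m =>
    pvWindow cps rn op (some q) rest
      (match pvFirstC cps q with
       | none => m
       | some c =>
         let m := pvD3 rn op c m
         let m := match pv? with | none => m | some pv => pvConnScanA cps pv c m
         match rest.head? with | none => m | some nx => pvConnScanA cps nx c m)

def pvPass1A (cps : List (String × List String)) (rn op : String) (m : PVM) (ports : List String) : PVM :=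
  ports.foldl (fun m p => match pvFirstC cps p with | none => m | some c => pvD3 rn op c m) m

def pvXHalfA (cps : List (String × List String)) (q : String) (nx? : Option String) (m : PVM) : PVM :=
  match nx?, pvFirstC cps q with
  | some nx, some c => pvConnScanA cps nx c m
  | _, _ => m

def pvPairsYA (cps : List (String × List String)) : String → List String → PVM → PVM
  | _, [], m => m
  | pv, q :: rest, m =>
    let m := match pvFirstC cps q with | none => m | some c => pvConnScanA cps pv c m
    pvPairsYA cps q rest (pvXHalfA cps q rest.head? m)

-- connScanA as a fold over the precomputed country list
theorem pvConnScanA_eq_connFold (cps : List (String × List String)) (nb tgt : String) (m : PVM) :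
    pvConnScanA cps nb tgt m = pvConnFold tgt (pvAllC cps nb) m := by
  induction cps generalizing m with
  | nil => rfl
  | cons ce t ih =>
    have hA : pvConnScanA (ce :: t) nb tgt m
        = pvConnScanA t nb tgt (if nb ∈ ce.2 ∧ ce.1 ≠ tgt then pvDmod m tgt (pvUpdConn ce.1) else m) := rfl
    rw [hA]
    by_cases hnb : nb ∈ ce.2
    · have hall : pvAllC (ce :: t) nb = ce.1 :: pvAllC t nb := by
        simp [pvAllC, List.filter_cons, hnb]
      rw [hall]
      have hB : pvConnFold tgt (ce.1 :: pvAllC t nb) m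
          = pvConnFold tgt (pvAllC t nb) (if ce.1 ≠ tgt then pvDmod m tgt (pvUpdConn ce.1) else m) := rfl
      rw [hB, ih]
      congr 1
      simp [hnb]
    · have hall : pvAllC (ce :: t) nb = pvAllC t nb := by
        simp [pvAllC, List.filter_cons, hnb]
      rw [hall, ← ih]
      congr 1
      simp [hnb]

theorem pvAddConnsB_eq_connScanA (cps : List (String × List String)) (s tgt : String) (m : PVM) :
    pvAddConnsB (pvBuildIdx cps).2 s tgt m = pvConnScanA cps s tgt m := by
  rw [pvConnScanA_eq_connFold]
  show pvConnFold tgt (((pvBuildIdx cps).2).getD s []) m = _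
  rw [pvBuildIdx_snd_getD]

-- ----- keys monotonicity -----
theorem mem_pvKeys_pvConnFold (l : List String) (tgt k : String) (m : PVM) (h : k ∈ pvKeys m) :
    k ∈ pvKeys (pvConnFold tgt l m) := by
  induction l generalizing m with
  | nil => exact h
  | cons c2 t ih =>
    simp only [pvConnFold, List.foldl_cons]
    split
    · exact ih _ (mem_pvKeys_pvDmod _ _ _ _ h)
    · exact ih _ h

theorem mem_pvKeys_pvConnScanA (cps : List (String × List String)) (s tgt k : String) (m : PVM)
    (h : k ∈ pvKeys m) : k ∈ pvKeys (pvConnScanA cps s tgt m) := by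
  rw [pvConnScanA_eq_connFold]; exact mem_pvKeys_pvConnFold _ _ _ _ h

theorem mem_pvKeys_pvD3_self (rn op c : String) (m : PVM) : c ∈ pvKeys (pvD3 rn op c m) :=
  mem_pvKeys_pvDmod _ _ _ _ (mem_pvKeys_pvDmod _ _ _ _ (mem_pvKeys_pvDmod_self _ _ _))

theorem mem_pvKeys_pvD3 (rn op c k : String) (m : PVM) (h : k ∈ pvKeys m) :
    k ∈ pvKeys (pvD3 rn op c m) :=
  mem_pvKeys_pvDmod _ _ _ _ (mem_pvKeys_pvDmod _ _ _ _ (mem_pvKeys_pvDmod _ _ _ _ h))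

-- ----- commuting a connections update past pass 1 -----
theorem pvD3_dmodConn (rn op c tgt c2 : String) (m : PVM) (h : tgt ∈ pvKeys m) :
    pvD3 rn op c (pvDmod m tgt (pvUpdConn c2)) = pvDmod (pvD3 rn op c m) tgt (pvUpdConn c2) := by
  by_cases hc : c = tgt
  · subst hc
    unfold pvD3
    rw [pvDmod_pvDmod_same, pvDmod_pvDmod_same, pvDmod_pvDmod_same,
        pvDmod_pvDmod_same, pvDmod_pvDmod_same, pvDmod_pvDmod_same]
    rfl
  · unfold pvD3
    rw [pvDmod_comm_ne _ _ _ _ _ hc (Or.inr h),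
        pvDmod_comm_ne _ _ _ _ _ hc (Or.inr (mem_pvKeys_pvDmod _ _ _ _ h)),
        pvDmod_comm_ne _ _ _ _ _ hc (Or.inr (mem_pvKeys_pvDmod _ _ _ _ (mem_pvKeys_pvDmod _ _ _ _ h)))]

theorem pvPass1A_dmodConn (cps : List (String × List String)) (rn op tgt c2 : String)
    (ports : List String) (m : PVM) (h : tgt ∈ pvKeys m) :
    pvPass1A cps rn op (pvDmod m tgt (pvUpdConn c2)) ports
      = pvDmod (pvPass1A cps rn op m ports) tgt (pvUpdConn c2) := by
  induction ports generalizing m with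
  | nil => rfl
  | cons p t ih =>
    simp only [pvPass1A, List.foldl_cons] at ih ⊢
    cases hfc : pvFirstC cps p with
    | none => exact ih _ h
    | some c =>
      dsimp only
      rw [pvD3_dmodConn _ _ _ _ _ _ h]
      exact ih _ (mem_pvKeys_pvD3 _ _ _ _ _ h)

theorem pvPass1A_connFold (cps : List (String × List String)) (rn op tgt : String)
    (l : List String) (ports : List String) (m : PVM) (h : tgt ∈ pvKeys m) :
    pvPass1A cps rn op (pvConnFold tgt l m) ports
      = pvConnFold tgt l (pvPass1A cps rn op m ports) := by
  induction l generalizing m with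
  | nil => rfl
  | cons c2 t ih =>
    simp only [pvConnFold, List.foldl_cons] at ih ⊢
    by_cases hc2 : c2 ≠ tgt
    · rw [if_pos hc2, if_pos hc2]
      rw [ih _ (mem_pvKeys_pvDmod _ _ _ _ h), pvPass1A_dmodConn _ _ _ _ _ _ _ h]
    · rw [if_neg hc2, if_neg hc2]
      exact ih _ h

theorem pvPass1A_connScanA (cps : List (String × List String)) (rn op s tgt : String)
    (ports : List String) (m : PVM) (h : tgt ∈ pvKeys m) :
    pvPass1A cps rn op (pvConnScanA cps s tgt m) ports
      = pvConnScanA cps s tgt (pvPass1A cps rn op m ports) := by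
  rw [pvConnScanA_eq_connFold, pvConnScanA_eq_connFold]
  exact pvPass1A_connFold _ _ _ _ _ _ _ h

-- ----- A's break-scan and enumerate loop in window normal form -----
theorem pvPortStepA_fst (cps rest : List (String × List String)) (rn op : String)
    (ports : List String) (i : Int) (port : String) (st : PVM × PySem.Set String) :
    (pvPortStepA cps rest rn op ports i port st).1
      = match pvFirstC rest port with
        | none => st.1
        | some c => pvAStepC cps rn op ports i c st.1 := by
  induction rest with
  | nil => simp [pvPortStepA, pvFirstC]
  | cons ce t ih =>
    obtain ⟨country, cports⟩ := ce
    by_cases hp : port ∈ cports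
    · simp [pvPortStepA, hp, pvFirstC, List.filter_cons, pvAStepC, pvD3]
    · simp [pvPortStepA, hp, pvFirstC, List.filter_cons] at ih ⊢
      exact ih

theorem pvFoldA_fst (cps : List (String × List String)) (rn op : String) (ports : List String)
    (l : List (Int × String)) (m : PVM) (vis : PySem.Set String) :
    ((l.foldl (fun st ip => pvPortStepA cps cps rn op ports ip.1 ip.2 st) (m, vis)).1)
      = l.foldl (fun m ip => pvAStep cps rn op ports ip.1 ip.2 m) m := by
  induction l generalizing m vis with
  | nil => rfl
  | cons ip t ih =>
    simp only [List.foldl_cons]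
    have hstep : pvPortStepA cps cps rn op ports ip.1 ip.2 (m, vis)
        = ((pvPortStepA cps cps rn op ports ip.1 ip.2 (m, vis)).1,
           (pvPortStepA cps cps rn op ports ip.1 ip.2 (m, vis)).2) := rfl
    rw [hstep, ih]
    rw [pvPortStepA_fst]
    rfl

theorem pvEnum_window (cps : List (String × List String)) (rn op : String) :
    ∀ (suf pre : List String) (m : PVM),
    (PySem.List.enumerate suf (pre.length : Int)).foldl
        (fun m ip => pvAStep cps rn op (pre ++ suf) ip.1 ip.2 m) m
      = pvWindow cps rn op pre.getLast? suf m := by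
  intro suf
  induction suf with
  | nil => intro pre m; simp [PySem.List.enumerate, pvWindow]
  | cons q rest ih =>
    intro pre m
    rw [PySem.List.enumerate_cons, List.foldl_cons]
    have hstep : pvAStep cps rn op (pre ++ q :: rest) (pre.length : Int) q m
        = (match pvFirstC cps q with
           | none => m
           | some c =>
             let m := pvD3 rn op c m
             let m := match pre.getLast? with | none => m | some pv => pvConnScanA cps pv c m
             match rest.head? with | none => m | some nx => pvConnScanA cps nx c m) := by
      unfold pvAStep pvAStepC
      cases hfc : pvFirstC cps q with
      | none => rfl
      | some c =>
        dsimp only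
        -- the prev-port update
        have hprev : (if 0 < (pre.length : Int) then
              pvConnScanA cps ((PySem.List.pyGet? (pre ++ q :: rest) ((pre.length : Int) - 1)).getD "") c (pvD3 rn op c m)
            else pvD3 rn op c m)
            = (match pre.getLast? with
               | none => pvD3 rn op c m
               | some pv => pvConnScanA cps pv c (pvD3 rn op c m)) := by
          rcases List.eq_nil_or_concat pre with rfl | ⟨init, pv, hpre⟩
          · simp
          · subst hpre
            simp only [List.concat_eq_append]
            have hget : PySem.List.pyGet? ((init ++ [pv]) ++ q :: rest) (((init ++ [pv]).length : Int) - 1)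
                = some pv := by
              have h1 : (init ++ [pv]) ++ q :: rest = init ++ pv :: (q :: rest) := by simp
              have h2 : (((init ++ [pv]).length : Int)) - 1 = ((init.length : Nat) : Int) := by
                simp
              rw [h1, h2, PySem.List.pyGet?_append_length]
            rw [if_pos (by simp : (0:Int) < ((init ++ [pv]).length : Int))]
            rw [hget, List.getLast?_concat]
            rfl
        rw [hprev]
        -- the next-port update
        cases rest with
        | nil =>
          rw [if_neg (by simp : ¬ ((pre.length : Int) < ((pre ++ [q]).length : Int) - 1))]
          rfl
        | cons nx rest' =>
          have hget : PySem.List.pyGet? (pre ++ q :: nx :: rest') ((pre.length : Int) + 1)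
              = some nx := by
            have h1 : pre ++ q :: nx :: rest' = (pre ++ [q]) ++ nx :: rest' := by simp
            have h2 : ((pre.length : Int) + 1) = (((pre ++ [q]).length : Nat) : Int) := by simp
            rw [h1, h2, PySem.List.pyGet?_append_length]
          rw [if_pos (by simp [List.length_append]; omega :
                (pre.length : Int) < ((pre ++ q :: nx :: rest').length : Int) - 1)]
          rw [hget]
          rfl
    rw [hstep]
    have hlen : ((pre.length : Int) + 1) = (((pre ++ [q]).length : Nat) : Int) := by simp
    rw [hlen]
    have hih := ih (pre ++ [q]) (match pvFirstC cps q with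
           | none => m
           | some c =>
             let m := pvD3 rn op c m
             let m := match pre.getLast? with | none => m | some pv => pvConnScanA cps pv c m
             match rest.head? with | none => m | some nx => pvConnScanA cps nx c m)
    rw [List.append_assoc] at hih
    simp only [List.cons_append, List.nil_append] at hih
    rw [hih, List.getLast?_concat]
    rfl

-- ----- the reordering: window = pairs after pass 1 -----
theorem pvWindow_some (cps : List (String × List String)) (rn op : String) :
    ∀ (rest : List String) (pv : String) (m : PVM),
    pvWindow cps rn op (some pv) rest m
      = pvPairsYA cps pv rest (pvPass1A cps rn op m rest) := by
  intro rest
  induction rest with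
  | nil => intro pv m; rfl
  | cons q t ih =>
    intro pv m
    cases hfc : pvFirstC cps q with
    | none =>
      simp only [pvWindow, hfc, pvPairsYA, pvPass1A, List.foldl_cons, pvXHalfA]
      rw [ih]
      cases ht : t.head? <;> simp [pvXHalfA, hfc, pvPass1A]
    | some c =>
      simp only [pvWindow, hfc, pvPairsYA, pvPass1A, List.foldl_cons]
      rw [ih]
      congr 1
      show pvPass1A cps rn op
          (match t.head? with
           | none => pvConnScanA cps pv c (pvD3 rn op c m)
           | some nx => pvConnScanA cps nx c (pvConnScanA cps pv c (pvD3 rn op c m))) t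
        = pvXHalfA cps q t.head? (pvConnScanA cps pv c (pvPass1A cps rn op (pvD3 rn op c m) t))
      have hc : c ∈ pvKeys (pvD3 rn op c m) := mem_pvKeys_pvD3_self _ _ _ _
      cases ht : t.head? with
      | none =>
        simp only [pvXHalfA]
        rw [pvPass1A_connScanA _ _ _ _ _ _ _ hc]
      | some nx =>
        simp only [pvXHalfA, hfc]
        rw [pvPass1A_connScanA _ _ _ _ _ _ _ (mem_pvKeys_pvConnScanA _ _ _ _ _ hc),
            pvPass1A_connScanA _ _ _ _ _ _ _ hc]

-- pass 2 (B) in pairsY normal form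
theorem pvPass2_pairsY (cps : List (String × List String)) :
    ∀ (rest : List String) (q : String) (st : PVM),
    ((q :: rest).zip rest).foldl (fun m pq =>
        let m := match pvFirstC cps pq.1 with | none => m | some c => pvConnScanA cps pq.2 c m
        match pvFirstC cps pq.2 with | none => m | some c => pvConnScanA cps pq.1 c m) st
      = pvPairsYA cps q rest (pvXHalfA cps q rest.head? st) := by
  intro rest
  induction rest with
  | nil => intro q st; rfl
  | cons r t ih =>
    intro q st
    simp only [List.zip_cons_cons, List.foldl_cons]
    rw [ih]
    simp only [pvPairsYA, pvXHalfA, List.head?_cons]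
    cases hq : pvFirstC cps q <;> cases hr : pvFirstC cps r <;> simp [hq]

theorem pvPass2B_eq (cps : List (String × List String)) (st : PVM) (ports : List String) :
    pvPass2B (pvBuildIdx cps).1 (pvBuildIdx cps).2 st ports
      = match ports with
        | [] => st
        | q :: rest => pvPairsYA cps q rest (pvXHalfA cps q rest.head? st) := by
  cases ports with
  | nil => rfl
  | cons q rest =>
    show (((q :: rest).zip (PySem.List.slice (q :: rest) (some 1) none)).foldl _ st) = _
    rw [PySem.List.slice_from_one]
    simp only [List.tail_cons]
    rw [← pvPass2_pairsY cps rest q st]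
    apply PySem.List.foldl_congr_mem
    intro acc pq _
    simp only [pvBuildIdx_fst_get?, pvAddConnsB_eq_connScanA]

theorem pvPass1B_eq (cps : List (String × List String)) (rn op : String)
    (m : PVM) (ports : List String) :
    pvPass1B (pvBuildIdx cps).1 rn op m ports = pvPass1A cps rn op m ports := by
  apply PySem.List.foldl_congr_mem
  intro acc p _
  rw [pvBuildIdx_fst_get?]
  rfl

-- ----- one route: A = B -----
theorem pvRouteAB (cps : List (String × List String)) (ro : List (String × String))
    (m : PVM) (route : String × List String) :
    pvRouteA cps ro m route = pvRouteB (pvBuildIdx cps).1 (pvBuildIdx cps).2 ro m route := by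
  obtain ⟨rn, ports⟩ := route
  show (((PySem.List.enumerate ports).foldl
      (fun st ip => pvPortStepA cps cps rn ((PySem.Dict.mk ro).getD rn "Unknown") ports ip.1 ip.2 st)
      (m, PySem.Set.empty)).1)
    = pvPass2B (pvBuildIdx cps).1 (pvBuildIdx cps).2
        (pvPass1B (pvBuildIdx cps).1 rn ((PySem.Dict.mk ro).getD rn "Unknown") m ports) ports
  set op := (PySem.Dict.mk ro).getD rn "Unknown" with hop
  rw [pvFoldA_fst]
  have hw := pvEnum_window cps rn op ports [] m
  simp only [List.nil_append, List.length_nil, Nat.cast_zero, List.getLast?_nil] at hw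
  rw [hw, pvPass1B_eq, pvPass2B_eq]
  cases ports with
  | nil => rfl
  | cons q rest =>
    simp only [pvWindow]
    have hp1 : pvPass1A cps rn op m (q :: rest)
        = pvPass1A cps rn op (match pvFirstC cps q with
            | none => m | some c => pvD3 rn op c m) rest := rfl
    rw [hp1, pvWindow_some]
    cases hfc : pvFirstC cps q with
    | none =>
      dsimp only
      congr 1
      cases ht : rest.head? <;> simp [pvXHalfA, hfc]
    | some c =>
      dsimp only
      congr 1
      cases ht : rest.head? with
      | none => simp [pvXHalfA]
      | some nx =>
        simp only [pvXHalfA, hfc]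
        rw [pvPass1A_connScanA _ _ _ _ _ _ _ (mem_pvKeys_pvD3_self _ _ _ _)]

-- ===== VERDICT (by name: the statement is the Claim_ definition above) =====
theorem analyse_connectivity_metrics_spec : Claim_equal_analyse_connectivity_metrics := by
  intro routes cps ro _
  unfold Spec_analyse_connectivity_metrics
  show pvFinalize (routes.foldl (pvRouteA cps ro) [])
      = pvFinalize (routes.foldl (pvRouteB (pvBuildIdx cps).1 (pvBuildIdx cps).2 ro) [])
  congr 1
  apply PySem.List.foldl_congr_mem
  intro acc route _
  exact pvRouteAB cps ro acc route
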